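-- pv_equiv track=rewrite | github.com/yhyh4420/algorithm_baekjoon | 프로그래머스/1/42576. 완주하지 못한 선수/완주하지 못한 선수.py | solution
-- ===== SOURCE A (Python) =====
-- from collections import defaultdict
--
-- def solution(participant, completion):
--     participantDict = defaultdict(int)
--     for p in participant:
--         participantDict[p] += 1
--     for c in completion:
--         participantDict[c] -= 1
--     for key in participantDict:
--         if participantDict[key] == 1:
--             return key
-- ===== SOURCE B (Python) =====
-- def solution(participant, completion):
--     # cross each finisher off a working copy of the roster, then return the
--     # first participant left exactly once in the residual roster
--     remaining = list(participant)
--     for c in completion: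
--         try:
--             remaining.remove(c)
--         except ValueError:
--             pass
--     for p in participant:
--         if remaining.count(p) == 1:
--             return p
-- ===== Notes on version B (the rewrite author's own statement) =====
-- stated objective: alternative
-- what changed: Replaces the defaultdict +1/-1 tally and key scan with multiset subtraction: each completion name is physically removed from a working copy of the participant list, and the answer is the first participant left exactly once in that residual list.
-- outside the precondition, e.g. on solution([], []): A returns None, B returns None
import Mathlib
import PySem

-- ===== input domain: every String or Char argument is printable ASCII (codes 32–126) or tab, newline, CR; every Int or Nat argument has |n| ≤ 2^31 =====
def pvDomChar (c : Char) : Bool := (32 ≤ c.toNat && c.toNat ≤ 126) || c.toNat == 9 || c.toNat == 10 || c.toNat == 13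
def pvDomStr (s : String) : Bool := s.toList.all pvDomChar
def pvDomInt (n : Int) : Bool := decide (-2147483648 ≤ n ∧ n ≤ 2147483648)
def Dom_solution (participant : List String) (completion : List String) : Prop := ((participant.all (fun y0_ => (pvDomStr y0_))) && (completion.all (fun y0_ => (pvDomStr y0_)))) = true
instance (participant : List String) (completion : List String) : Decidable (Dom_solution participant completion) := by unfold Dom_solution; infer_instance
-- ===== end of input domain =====

-- B replaces A's defaultdict tally with multiset subtraction: finishers are removed one by one
-- from a copy of the roster and the first participant left exactly once in the residual is returned.

-- ===== PORT A =====
def solution (participant : List String) (completion : List String) : String :=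
  let d := participant.foldl (fun d p => d.modify p 0 (· + 1)) (PySem.Dict.empty : PySem.Dict String Int)
  let d := completion.foldl (fun d c => d.modify c 0 (· - 1)) d
  match d.keys.find? (fun k => d.getD k 0 == 1) with
  | some k => k
  | none => ""   -- Python falls through returning None (no str); excluded by Pre_solution

-- ===== PORT B =====
def solution_alt (participant : List String) (completion : List String) : String :=
  let remaining := completion.foldl
    (fun r c => match PySem.List.remove? r c with
      | some r' => r'
      | none => r)   -- list.remove raised ValueError: except-pass keeps r
    participant
  match participant.find? (fun p => remaining.count p == 1) with
  | some p => p
  | none => ""   -- Python falls through returning None (no str); excluded by Pre_solution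

-- ===== PRECONDITION & SPEC =====
-- Pre_ excludes exactly the inputs where no name occurs once more in participant than in completion:
-- there A's final loop finds no key and the Python returns None, which is not a String.
def Pre_solution (participant : List String) (completion : List String) : Prop :=
  ∃ p ∈ participant, (participant.count p : Int) - (completion.count p : Int) = 1
instance (participant : List String) (completion : List String) : Decidable (Pre_solution participant completion) := by unfold Pre_solution; infer_instance
def pvWitness_solution : List String × List String := (["ann", "bob", "ann"], ["ann", "ann"])

def Spec_solution (participant : List String) (completion : List String) (out : String) : Prop := out = solution_alt participant completion
instance (participant : List String) (completion : List String) (out : String) : Decidable (Spec_solution participant completion out) := by unfold Spec_solution; infer_instance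

-- ===== CLAIM (what is proved, stated in full; the proofs are below) =====
def Claim_equal_solution : Prop := ∀ (participant : List String) (completion : List String), Dom_solution participant completion → Pre_solution participant completion → Spec_solution participant completion (solution participant completion)

-- ===== LEMMAS AND PROOFS =====

-- the decrementing pass of A, mirror of PySem.Dict.getD_foldl_modify_add_one
theorem getD_foldl_modify_sub_one (l : List String) (d : PySem.Dict String Int) (v : String) :
    (l.foldl (fun d x => d.modify x 0 (· - 1)) d).getD v 0 = d.getD v 0 - l.count v := by
  induction l generalizing d with
  | nil => simp
  | cons x xs ih =>
    simp only [List.foldl_cons, ih, PySem.Dict.getD_modify, List.count_cons]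
    by_cases h : v = x
    · subst h; simp; ring
    · have h2 : (x == v) = false := by simp [Ne.symm h]
      simp [h, h2]

-- find? skips filtered-out occurrences of an element the predicate rejects
theorem find?_filter_ne (s : List String) (x : String) (p : String → Bool) (hx : p x = false) :
    (s.filter (fun y => !y == x)).find? p = s.find? p := by
  induction s with
  | nil => rfl
  | cons y ys ih =>
    by_cases hy : y = x
    · subst hy; simp [hx, ih]
    · have hne : (y == x) = false := by simp [hy]
      rw [List.filter_cons]
      simp only [hne, Bool.not_false, if_true]
      cases hp : p y <;> simp [hp, ih]

-- first match in set(xs) (first-insertion order) = first match in xs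
theorem find?_ofList (xs : List String) (p : String → Bool) :
    (PySem.Set.ofList xs).find? p = xs.find? p := by
  induction xs with
  | nil => rfl
  | cons x xs ih =>
    rw [PySem.Set.ofList_cons]
    cases hp : p x with
    | true => simp [hp]
    | false =>
      simp only [List.find?_cons, hp]
      rw [show PySem.Set.discard (PySem.Set.ofList xs) x
            = (PySem.Set.ofList xs).filter (fun y => !y == x) from rfl]
      rw [find?_filter_ne _ _ _ hp, ih]

-- value of A's table at any key
theorem table_val (participant completion : List String) (v : String) :
    ((completion.foldl (fun d c => d.modify c 0 (· - 1))
        (participant.foldl (fun d p => d.modify p 0 (· + 1)) (PySem.Dict.empty : PySem.Dict String Int))).getD v 0)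
      = (participant.count v : Int) - (completion.count v : Int) := by
  rw [getD_foldl_modify_sub_one, PySem.Dict.getD_foldl_modify_add_one]
  simp

-- B's residual roster counts: removing each finisher subtracts (truncated) its count
theorem count_foldl_remove (cs : List String) (r : List String) (v : String) :
    (cs.foldl (fun r c => match PySem.List.remove? r c with
        | some r' => r'
        | none => r) r).count v = r.count v - cs.count v := by
  induction cs generalizing r with
  | nil => simp
  | cons c cs ih =>
    simp only [List.foldl_cons, List.count_cons]
    by_cases hc : c ∈ r
    · rw [PySem.List.remove?_eq_some_erase _ _ hc, ih, List.count_erase]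
      have h1 : 1 ≤ r.count c := List.one_le_count_iff.mpr hc
      by_cases h : c = v
      · subst h; simp; omega
      · simp [h]
    · rw [(PySem.List.remove?_eq_none_iff _ _).mpr hc, ih]
      by_cases h : c = v
      · subst h
        have h0 : r.count c = 0 := List.count_eq_zero.mpr hc
        simp [h0]
      · simp [h]

-- B's residual-count test agrees with the net-count test
theorem pred_eq (participant completion : List String) (p : String) :
    ((completion.foldl (fun r c => match PySem.List.remove? r c with
        | some r' => r'
        | none => r) participant).count p == 1)
      = (((participant.count p : Int) - (completion.count p : Int)) == 1) := by
  rw [count_foldl_remove]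
  rw [Bool.eq_iff_iff]
  simp only [beq_iff_eq]
  omega

-- ===== VERDICT (by name: the statement is the Claim_ definition above) =====
theorem solution_spec : Claim_equal_solution := by
  intro participant completion _ _
  unfold Spec_solution solution solution_alt
  have hval := table_val participant completion
  simp only []
  have hpredB : (fun p => ((completion.foldl (fun r c => match PySem.List.remove? r c with
        | some r' => r'
        | none => r) participant).count p == 1))
      = (fun p => ((participant.count p : Int) - (completion.count p : Int) == 1)) := by
    funext p; exact pred_eq participant completion p
  have hpred : (fun k => (((completion.foldl (fun d c => d.modify c 0 (· - 1))
        (participant.foldl (fun d p => d.modify p 0 (· + 1)) (PySem.Dict.empty : PySem.Dict String Int))).getD k 0) == 1))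
      = (fun p => ((participant.count p : Int) - (completion.count p : Int) == 1)) := by
    funext k; exact congrArg (fun z => z == 1) (hval k)
  have hkeys : (completion.foldl (fun d c => d.modify c 0 (· - 1))
        (participant.foldl (fun d p => d.modify p 0 (· + 1)) (PySem.Dict.empty : PySem.Dict String Int))).keys
      = PySem.Set.update (PySem.Set.ofList participant) completion := by
    rw [PySem.Dict.keys_foldl_modify (f := fun _ _ v => v - 1),
        PySem.Dict.keys_foldl_modify (f := fun _ _ v => v + 1)]
    simp [PySem.Set.update_nil_left]
  rw [hkeys, hpred, hpredB, PySem.Set.update_eq_append_filter, List.find?_append, find?_ofList]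
  have hnone : ((PySem.Set.ofList completion).filter
      (fun y => !(PySem.Set.ofList participant).contains y)).find?
      (fun p => ((participant.count p : Int) - (completion.count p : Int) == 1)) = none := by
    rw [List.find?_eq_none]
    intro y hy
    have hmem := List.of_mem_filter hy
    have hnotin : y ∉ participant := by
      simp only [Bool.not_eq_true'] at hmem
      intro hc
      have hcon : (PySem.Set.ofList participant).contains y = true := by
        rw [PySem.Set.contains_iff, PySem.Set.mem_ofList]; exact hc
      rw [hcon] at hmem; exact Bool.noConfusion hmem
    have h0 : participant.count y = 0 := List.count_eq_zero.mpr hnotin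
    simp [h0]
    omega
  rw [hnone]
  simp
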